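-- pv_equiv track=rewrite | github.com/khushigoyal14/Adaptsort | src/python/adapt_sort.py | detect_runs
-- ===== SOURCE A (Python) =====
-- def detect_runs(arr):
--     """
--     Detect ascending runs for potential stable merges.
--     Returns list of (start, end) indices of runs.
--     """
--     runs = []
--     n = len(arr)
--     if n <= 1:
--         runs.append((0, n - 1))
--         return runs
--     start = 0
--     for i in range(1, n):
--         if arr[i] < arr[i - 1]:
--             runs.append((start, i - 1))
--             start = i
--     runs.append((start, n - 1))
--     return runs
-- ===== SOURCE B (Python) =====
-- def detect_runs(arr):
--     n = len(arr)
--     breaks = [i for i in range(1, n) if arr[i] < arr[i - 1]]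
--     boundaries = [0] + breaks + [n]
--     return [(s, e - 1) for s, e in zip(boundaries, boundaries[1:])]
-- ===== Notes on version B (the rewrite author's own statement) =====
-- stated objective: simpler
-- what changed: B replaces A's stateful single-pass emitter (with an n<=1 special case) by a two-phase decomposition: collect break indices, then derive (start,end) intervals from consecutive boundaries; the n<=1 case disappears.
import Mathlib
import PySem

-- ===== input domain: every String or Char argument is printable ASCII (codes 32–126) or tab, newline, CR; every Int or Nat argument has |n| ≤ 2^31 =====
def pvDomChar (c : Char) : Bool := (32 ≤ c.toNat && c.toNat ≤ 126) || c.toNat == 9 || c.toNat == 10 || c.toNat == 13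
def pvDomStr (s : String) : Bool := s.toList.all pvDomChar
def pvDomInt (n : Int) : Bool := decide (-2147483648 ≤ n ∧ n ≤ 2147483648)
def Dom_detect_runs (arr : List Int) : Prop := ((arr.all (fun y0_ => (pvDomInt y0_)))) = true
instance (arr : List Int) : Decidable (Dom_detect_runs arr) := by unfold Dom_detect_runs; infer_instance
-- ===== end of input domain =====

-- B replaces A's stateful single-pass emitter (with an n<=1 special case) by a two-phase
-- decomposition (collect break indices, then derive intervals from consecutive boundaries);
-- same O(n) cost, simpler.

-- ===== PORT A =====
-- literal transliteration of A: n<=1 special case, then a fold over range(1,n)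
-- carrying (runs, start); arr[i] is read via pyGet? (always in range here), default 0 unreachable.
def detect_runs (arr : List Int) : List (Int × Int) :=
  let n : Int := arr.length
  if n ≤ 1 then [(0, n - 1)]
  else
    let st := (PySem.List.pyRange 1 n 1).foldl
      (fun (p : List (Int × Int) × Int) i =>
        if (PySem.List.pyGet? arr i).getD 0 < (PySem.List.pyGet? arr (i - 1)).getD 0 then
          (p.1 ++ [(p.2, i - 1)], i)
        else p)
      ([], 0)
    st.1 ++ [(st.2, n - 1)]

-- ===== PORT B =====
-- literal transliteration of Source B: breaks list, boundaries, zip with the tail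
-- (boundaries[1:] = drop 1, exact since the start index 1 is nonnegative and boundaries ≠ []).
def detect_runs_alt (arr : List Int) : List (Int × Int) :=
  let n : Int := arr.length
  let breaks := (PySem.List.pyRange 1 n 1).filter
    (fun i => decide ((PySem.List.pyGet? arr i).getD 0 < (PySem.List.pyGet? arr (i - 1)).getD 0))
  let boundaries := [(0 : Int)] ++ breaks ++ [n]
  (boundaries.zip (boundaries.drop 1)).map (fun se => (se.1, se.2 - 1))

-- ===== PRECONDITION & SPEC =====
def Spec_detect_runs (arr : List Int) (out : List (Int × Int)) : Prop := out = detect_runs_alt arr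
instance (arr : List Int) (out : List (Int × Int)) : Decidable (Spec_detect_runs arr out) := by unfold Spec_detect_runs; infer_instance

-- ===== CLAIM (what is proved, stated in full; the proofs are below) =====
def Claim_equal_detect_runs : Prop := ∀ (arr : List Int), Dom_detect_runs arr → Spec_detect_runs arr (detect_runs arr)

-- ===== LEMMAS AND PROOFS =====

-- Invariant of A's fold: for any scanned index list L, initial accumulator acc and
-- current run start s, A's fold result (with final pair (·, e-1) appended) equals
-- acc followed by the intervals derived from boundaries s :: L.filter p ++ [e].
theorem detect_runs_fold_inv (p : Int → Prop) [DecidablePred p] (e : Int) :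
    ∀ (L : List Int) (acc : List (Int × Int)) (s : Int),
      ((L.foldl (fun (q : List (Int × Int) × Int) i => if p i then (q.1 ++ [(q.2, i - 1)], i) else q) (acc, s)).1
        ++ [((L.foldl (fun (q : List (Int × Int) × Int) i => if p i then (q.1 ++ [(q.2, i - 1)], i) else q) (acc, s)).2, e - 1)]) =
      acc ++ (((s :: (L.filter (fun i => decide (p i)) ++ [e])).zip (L.filter (fun i => decide (p i)) ++ [e])).map
        (fun se => (se.1, se.2 - 1))) := by
  intro L
  induction L with
  | nil => intro acc s; simp
  | cons i L ih =>
    intro acc s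
    by_cases hp : p i
    · simp only [List.foldl_cons, List.filter_cons, hp, if_pos, decide_true]
      rw [ih (acc ++ [(s, i - 1)]) i]
      simp
    · simp only [List.foldl_cons, List.filter_cons, hp, if_neg, not_false_eq_true, decide_false]
      rw [ih acc s]
      simp

-- range(1, n) is empty when n ≤ 1
theorem pyRange_one_n_empty (n : Int) (h : n ≤ 1) : PySem.List.pyRange 1 n 1 = [] := by
  rw [PySem.List.pyRange_one]
  have : (n - 1).toNat = 0 := by omega
  rw [this]
  rfl

-- ===== VERDICT (by name: the statement is the Claim_ definition above) =====
theorem detect_runs_spec : Claim_equal_detect_runs := by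
  intro arr _
  unfold Spec_detect_runs detect_runs detect_runs_alt
  set n : Int := (arr.length : Int) with hn
  by_cases h1 : n ≤ 1
  · simp only [if_pos h1, pyRange_one_n_empty n h1]
    simp
  · simp only [if_neg h1, List.cons_append, List.nil_append, List.drop_succ_cons, List.drop_zero]
    exact detect_runs_fold_inv
      (fun i => (PySem.List.pyGet? arr i).getD 0 < (PySem.List.pyGet? arr (i - 1)).getD 0)
      n (PySem.List.pyRange 1 n 1) [] 0
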